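-- pv_equiv track=rewrite | github.com/vrthra/mimid | Cmimid/src/grammartools.py | replace_keys_by_rule
-- ===== SOURCE A (Python) =====
-- def remove_references(keys_to_replace):
--     to_process = list(keys_to_replace.keys())
--     updated_dict = {}
--     references = {}
--     order = []
--     while to_process:
--         key, *to_process = to_process
--         rule = keys_to_replace[key]
--         new_rule = []
--         skip = False
--         for token in rule:
--             if token not in updated_dict:
--                 if token in to_process:
--                     # so this token will get defined later. We simply postpone
--                     # the processing of this key until that key is defined.
--                     # TODO: check for cycles.
--                     to_process.append(key)
--                     references.setdefault(token, set()).add(key)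
--                     skip = True
--                     break
--                 else:
--                     new_rule.append(token)
--             else:
--                 new_rule.extend(updated_dict[token])
--         if not skip:
--             order.append(key)
--             updated_dict[key] = new_rule
--     return updated_dict
--
-- def replace_keys_by_rule(grammar, keys_to_replace):
--     # we now need to verify that none of the keys are part of the sequences.
--     keys_to_replace = remove_references(keys_to_replace)
--
--     new_grammar = {}
--     for key in grammar:
--         if key in keys_to_replace: continue
--
--         new_rules = []
--         for rule in grammar[key]:
--             new_rule = []
--             for token in rule:
--                 if token in keys_to_replace:
--                     new_rule.extend(keys_to_replace[token])
--                 else: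
--                     new_rule.append(token)
--             new_rules.append(new_rule)
--         new_grammar[key] = new_rules
--     return new_grammar
-- ===== SOURCE B (Python) =====
-- def _expand(key, rules, memo):
--     # fully expand one rule: replace each token that names another rule by
--     # that rule's (recursively expanded) tokens; a self-reference stays literal
--     if key in memo:
--         return memo[key]
--     out = []
--     for t in rules[key]:
--         if t != key and t in rules:
--             out.extend(_expand(t, rules, memo))
--         else:
--             out.append(t)
--     memo[key] = out
--     return out
--
-- def replace_keys_by_rule(grammar, keys_to_replace):
--     memo = {}
--     for k in keys_to_replace:
--         _expand(k, keys_to_replace, memo)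
--     return {
--         key: [[x for t in rule
--                  for x in (memo[t] if t in memo else [t])]
--               for rule in rules]
--         for key, rules in grammar.items() if key not in keys_to_replace
--     }
-- ===== Notes on version B (the rewrite author's own statement) =====
-- stated objective: faster
-- what changed: A's remove_references worklist that rescans to_process ('token in to_process' list scans) and re-queues postponed keys is replaced by a memoized recursive (DFS) expansion with dict lookups, and the output dict is built by a single filter/map comprehension instead of nested accumulate-and-append loops.
import Mathlib
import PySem

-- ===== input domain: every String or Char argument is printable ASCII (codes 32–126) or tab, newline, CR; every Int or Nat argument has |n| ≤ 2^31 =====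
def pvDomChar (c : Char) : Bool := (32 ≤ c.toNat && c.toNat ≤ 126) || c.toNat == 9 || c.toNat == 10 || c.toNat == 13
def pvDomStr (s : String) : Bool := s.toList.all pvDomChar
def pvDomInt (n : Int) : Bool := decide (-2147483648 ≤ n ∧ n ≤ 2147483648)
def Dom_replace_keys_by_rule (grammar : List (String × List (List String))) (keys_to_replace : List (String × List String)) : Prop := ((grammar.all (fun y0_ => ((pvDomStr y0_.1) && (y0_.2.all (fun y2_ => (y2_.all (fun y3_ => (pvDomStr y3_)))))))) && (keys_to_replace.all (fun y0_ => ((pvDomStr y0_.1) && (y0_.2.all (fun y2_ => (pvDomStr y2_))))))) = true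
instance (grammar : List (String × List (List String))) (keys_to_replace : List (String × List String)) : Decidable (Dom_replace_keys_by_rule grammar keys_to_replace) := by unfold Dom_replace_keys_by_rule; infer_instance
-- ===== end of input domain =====

-- B replaces A's worklist-with-postponement expansion (repeated 'token in to_process'
-- list scans) by a memoized recursive (DFS) expansion plus a filter/map substitution pass.

-- ===== PORT A =====
-- inner 'for token in rule' loop of remove_references, with its break ('skip')
def rrScan (updated : PySem.Dict String (List String)) (toProcess : List String) (key : String)
    (references : PySem.Dict String (PySem.Set String)) :
    List String → List String →
    (List String × Bool × List String × PySem.Dict String (PySem.Set String))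
  | [], newRule => (newRule, false, toProcess, references)
  | token :: rest, newRule =>
    if (updated.get? token).isNone then
      if toProcess.contains token then
        (newRule, true, toProcess ++ [key],
         references.insert token ((references.getD token (PySem.Set.ofList [])).add key))
      else rrScan updated toProcess key references rest (newRule ++ [token])
    else rrScan updated toProcess key references rest (newRule ++ updated.getD token [])

-- the 'while to_process' loop; fuel is a totality guard only (Python A diverges on
-- cyclic inputs, which Pre_ excludes; (n+1)^2 pops suffice on acyclic inputs)
def rrLoop (ktrD : PySem.Dict String (List String)) :
    Nat → List String → PySem.Dict String (List String) →
    PySem.Dict String (PySem.Set String) → List String → PySem.Dict String (List String)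
  | 0, _, updated, _, _ => updated
  | _ + 1, [], updated, _, _ => updated
  | fuel + 1, key :: rest, updated, references, order =>
    match rrScan updated rest key references (ktrD.getD key []) [] with
    | (newRule, skip, toProcess', references') =>
      if skip then rrLoop ktrD fuel toProcess' updated references' order
      else rrLoop ktrD fuel toProcess' (updated.insert key newRule) references' (order ++ [key])

def remove_references (keys_to_replace : List (String × List String)) :
    PySem.Dict String (List String) :=
  let ktrD := PySem.Dict.ofList keys_to_replace
  rrLoop ktrD ((ktrD.keys.length + 1) * (ktrD.keys.length + 1)) ktrD.keys
    PySem.Dict.empty PySem.Dict.empty []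

def replace_keys_by_rule (grammar : List (String × List (List String))) (keys_to_replace : List (String × List String)) : List (String × List (List String)) :=
  let ktr := remove_references keys_to_replace
  let grammarD := PySem.Dict.ofList grammar
  (grammarD.items.foldl (fun new_grammar kv =>
      if (ktr.get? kv.1).isSome then new_grammar
      else new_grammar.insert kv.1
        (kv.2.foldl (fun new_rules rule =>
          new_rules ++ [rule.foldl (fun new_rule token =>
            if (ktr.get? token).isSome then new_rule ++ ktr.getD token []
            else new_rule ++ [token]) []]) [])) PySem.Dict.empty).items

-- ===== PORT B =====
-- memoized recursive expansion (_expand in Source B); fuel is a totality guard only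
-- (recursion depth is bounded by the number of keys on the acyclic inputs Pre_ admits)
mutual
def expandB (ktrD : PySem.Dict String (List String)) :
    Nat → String → PySem.Dict String (List String) →
    (List String × PySem.Dict String (List String))
  | 0, _, memo => ([], memo)
  | fuel + 1, key, memo =>
    match memo.get? key with
    | some v => (v, memo)
    | none =>
      match expandListB ktrD fuel key (ktrD.getD key []) memo with
      | (out, memo') => (out, memo'.insert key out)
termination_by fuel _ _ => (fuel, 0)
def expandListB (ktrD : PySem.Dict String (List String)) :
    Nat → String → List String → PySem.Dict String (List String) →
    (List String × PySem.Dict String (List String))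
  | _, _, [], memo => ([], memo)
  | fuel, key, t :: ts, memo =>
    if !(t == key) && ktrD.contains t then
      match expandB ktrD fuel t memo with
      | (v, memo1) =>
        match expandListB ktrD fuel key ts memo1 with
        | (rest, memo2) => (v ++ rest, memo2)
    else
      match expandListB ktrD fuel key ts memo with
      | (rest, memo1) => (t :: rest, memo1)
termination_by fuel _ ts _ => (fuel, ts.length + 1)
end

def replace_keys_by_rule_alt (grammar : List (String × List (List String))) (keys_to_replace : List (String × List String)) : List (String × List (List String)) :=
  let ktrD := PySem.Dict.ofList keys_to_replace
  let memo := ktrD.keys.foldl (fun m k => (expandB ktrD ktrD.keys.length k m).2) PySem.Dict.empty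
  ((PySem.Dict.ofList grammar).items.filter (fun kv => !(ktrD.contains kv.1))).map
    (fun kv => (kv.1, kv.2.map (fun rule => rule.flatMap (fun t =>
      match memo.get? t with
      | some v => v
      | none => [t]))))

-- ===== PRECONDITION & SPEC =====
-- Acyclicity of the input's key-dependency graph (an edge k → t when token t of k's rule
-- names another key, t ≠ k), stated as the textbook criterion 'a complete topological
-- order exists', via Kahn elimination of that graph. This is a property of the INPUT's
-- shape only: it computes no expansion and shares nothing with either port.
def kahnReady (ktrD : PySem.Dict String (List String)) (acc : List String) (k : String) : Bool :=
  (ktrD.getD k []).all (fun t => !(ktrD.contains t) || t == k || acc.contains t)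

def kahnRounds (ktrD : PySem.Dict String (List String)) :
    Nat → List String → List String → List String
  | 0, acc, _ => acc
  | fuel + 1, acc, rem =>
    let ready := rem.filter (kahnReady ktrD acc)
    if ready.isEmpty then acc
    else kahnRounds ktrD fuel (acc ++ ready) (rem.filter (fun k => !(ready.contains k)))

def kahnOrder (ktrD : PySem.Dict String (List String)) : List String :=
  kahnRounds ktrD ktrD.keys.length [] ktrD.keys

-- Pre_ excludes exactly the inputs whose key-dependency graph has a cycle through two or
-- more distinct keys: there Python A's while loop postpones forever and never returns.
def Pre_replace_keys_by_rule (grammar : List (String × List (List String))) (keys_to_replace : List (String × List String)) : Prop :=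
  (kahnOrder (PySem.Dict.ofList keys_to_replace)).length
    = (PySem.Dict.ofList keys_to_replace).keys.length

instance (grammar : List (String × List (List String))) (keys_to_replace : List (String × List String)) : Decidable (Pre_replace_keys_by_rule grammar keys_to_replace) := by unfold Pre_replace_keys_by_rule; infer_instance

def pvWitness_replace_keys_by_rule : (List (String × List (List String))) × (List (String × List String)) :=
  ([("S", [["k", "x"], ["j"]]), ("T", [[]])],
   [("k", ["j", "a", "k"]), ("j", ["b"])])

def Spec_replace_keys_by_rule (grammar : List (String × List (List String))) (keys_to_replace : List (String × List String)) (out : List (String × List (List String))) : Prop := out = replace_keys_by_rule_alt grammar keys_to_replace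
instance (grammar : List (String × List (List String))) (keys_to_replace : List (String × List String)) (out : List (String × List (List String))) : Decidable (Spec_replace_keys_by_rule grammar keys_to_replace out) := by unfold Spec_replace_keys_by_rule; infer_instance

-- ===== CLAIM (what is proved, stated in full; the proofs are below) =====
def Claim_equal_replace_keys_by_rule : Prop := ∀ (grammar : List (String × List (List String))) (keys_to_replace : List (String × List String)), Dom_replace_keys_by_rule grammar keys_to_replace → Pre_replace_keys_by_rule grammar keys_to_replace → Spec_replace_keys_by_rule grammar keys_to_replace (replace_keys_by_rule grammar keys_to_replace)

-- ===== LEMMAS AND PROOFS =====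

-- the canonical one-step expansion a fully-expanded table must satisfy
def stepFun (d : PySem.Dict String (List String)) (f : String → List String) (k : String) : List String :=
  (d.getD k []).flatMap (fun t => if d.contains t && !(t == k) then f t else [t])

-- invariant satisfied by the partial tables both programs build
def EqnInv (d U : PySem.Dict String (List String)) : Prop :=
  ∀ k v, U.get? k = some v →
    (∀ t ∈ d.getD k [], d.contains t = true → t ≠ k → U.contains t = true) ∧
    v = stepFun d (fun t => U.getD t []) k

-- a list of keys is dependency-closed left to right
def OrdProp (d : PySem.Dict String (List String)) (ord : List String) : Prop :=
  ∀ i (h : i < ord.length), ∀ t, t ∈ d.getD ord[i] [] → d.contains t = true → t ≠ ord[i] →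
    t ∈ ord.take i

structure OrdFacts (d : PySem.Dict String (List String)) (ord : List String) : Prop where
  nodup : ord.Nodup
  sub : ∀ x ∈ ord, x ∈ d.keys
  op : OrdProp d ord
  comp : ∀ x ∈ d.keys, x ∈ ord

lemma mem_take_idxOf_lt {α : Type} [DecidableEq α] (l : List α) (t : α) (i : Nat)
    (h : t ∈ l.take i) : l.idxOf t < i := by
  induction l generalizing i with
  | nil => simp at h
  | cons a l ih =>
    cases i with
    | zero => simp at h
    | succ i =>
      rw [List.take_succ_cons] at h
      by_cases hta : t = a
      · subst hta; simp [List.idxOf_cons_self]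
      · rcases List.mem_cons.mp h with h' | h'
        · exact absurd h' hta
        · rw [List.idxOf_cons_ne _ (fun e => hta e.symm)]
          exact Nat.succ_lt_succ (ih i h')

lemma OrdProp_append (d : PySem.Dict String (List String)) (acc ready : List String)
    (h : OrdProp d acc) (hr : ∀ k ∈ ready, kahnReady d acc k = true) :
    OrdProp d (acc ++ ready) := by
  intro i hi t ht hc hne
  rw [List.take_append]
  by_cases hlt : i < acc.length
  · have he : (acc ++ ready)[i] = acc[i] := List.getElem_append_left hlt
    rw [he] at ht hne
    exact List.mem_append_left _ (h i hlt t ht hc hne)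
  · rw [Nat.not_lt] at hlt
    have hi' : i - acc.length < ready.length := by
      rw [List.length_append] at hi; omega
    have he : (acc ++ ready)[i] = ready[i - acc.length] := List.getElem_append_right hlt
    have hrm : ready[i - acc.length] ∈ ready := List.getElem_mem hi'
    have hready := hr _ hrm
    unfold kahnReady at hready
    rw [List.all_eq_true] at hready
    rw [he] at ht hne
    have h3 := hready t ht
    have hta : t ∈ acc := by
      have hbe : (t == ready[i - acc.length]) = false := by
        simp only [beq_eq_false_iff_ne, ne_eq]; exact hne
      simp only [hc, hbe, Bool.not_true, Bool.false_or, Bool.or_eq_true,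
        List.contains_iff_mem] at h3
      simpa using h3
    apply List.mem_append_left
    rw [List.take_of_length_le (by omega)]
    exact hta

lemma kahnRounds_spec (d : PySem.Dict String (List String)) :
    ∀ (fuel : Nat) (acc rem : List String), (acc ++ rem).Nodup → OrdProp d acc →
    (kahnRounds d fuel acc rem).Nodup ∧
    (∀ x ∈ kahnRounds d fuel acc rem, x ∈ acc ++ rem) ∧
    OrdProp d (kahnRounds d fuel acc rem) := by
  intro fuel
  induction fuel with
  | zero =>
    intro acc rem hnd hop
    refine ⟨hnd.of_append_left, fun x hx => List.mem_append_left _ hx, hop⟩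
  | succ fuel ih =>
    intro acc rem hnd hop
    rw [kahnRounds]
    by_cases he : (rem.filter (kahnReady d acc)).isEmpty = true
    · simp only [he, if_pos rfl]
      exact ⟨hnd.of_append_left, fun x hx => List.mem_append_left _ hx, hop⟩
    · simp only [he]
      rw [if_neg (by simp [he])]
      have hperm : (rem.filter (kahnReady d acc) ++
          rem.filter (fun k => !((rem.filter (kahnReady d acc)).contains k))).Perm rem := by
        have hcong : rem.filter (fun k => !((rem.filter (kahnReady d acc)).contains k))
            = rem.filter (fun k => !(kahnReady d acc k)) := by
          apply List.filter_congr
          intro x hx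
          by_cases hp : kahnReady d acc x = true <;>
            simp [List.contains_iff_mem, List.mem_filter, hx, hp]
        rw [hcong]
        exact List.filter_append_perm _ _
      have hnd' : (acc ++ (rem.filter (kahnReady d acc) ++
          rem.filter (fun k => !((rem.filter (kahnReady d acc)).contains k)))).Nodup := by
        exact ((hperm.append_left acc).nodup_iff).mpr hnd
      rw [← List.append_assoc] at hnd'
      have hop' : OrdProp d (acc ++ rem.filter (kahnReady d acc)) := by
        apply OrdProp_append d acc _ hop
        intro k hk
        exact (List.mem_filter.mp hk).2
      obtain ⟨h1, h2, h3⟩ := ih _ _ hnd' hop'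
      refine ⟨h1, fun x hx => ?_, h3⟩
      have := h2 x hx
      rw [List.append_assoc] at this
      rcases List.mem_append.mp this with h | h
      · exact List.mem_append_left _ h
      · exact List.mem_append_right _ (hperm.mem_iff.mp h)

lemma ordFacts_of_pre (d : PySem.Dict String (List String)) (hk : d.keys.Nodup)
    (hlen : (kahnOrder d).length = d.keys.length) : OrdFacts d (kahnOrder d) := by
  obtain ⟨h1, h2, h3⟩ := kahnRounds_spec d d.keys.length [] d.keys (by simpa using hk)
    (fun i hi => by simp at hi)
  have hsub : ∀ x ∈ kahnOrder d, x ∈ d.keys := fun x hx => by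
    simpa using h2 x hx
  refine ⟨h1, hsub, h3, ?_⟩
  have hsp : (kahnOrder d).Subperm d.keys := List.subperm_of_subset h1 hsub
  have hperm : (kahnOrder d).Perm d.keys := hsp.perm_of_length_le (le_of_eq hlen.symm)
  exact fun x hx => hperm.mem_iff.mpr hx

lemma stepFun_congr (d : PySem.Dict String (List String)) (f g : String → List String) (k : String)
    (h : ∀ t ∈ d.getD k [], d.contains t = true → t ≠ k → f t = g t) :
    stepFun d f k = stepFun d g k := by
  unfold stepFun
  apply List.flatMap_congr
  intro t ht
  by_cases hc : d.contains t = true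
  · by_cases hne : t = k
    · simp [hne]
    · simp only [hc, Bool.true_and]
      rw [h t ht hc hne]
  · simp [hc]

lemma ord_deps_lt (d : PySem.Dict String (List String)) (ord : List String)
    (hO : OrdFacts d ord) (k t : String) (hk : k ∈ ord)
    (ht : t ∈ d.getD k []) (hc : d.contains t = true) (hne : t ≠ k) :
    ord.idxOf t < ord.idxOf k := by
  have hi : ord.idxOf k < ord.length := List.idxOf_lt_length_of_mem hk
  have hk' : ord[ord.idxOf k] = k := List.getElem_idxOf hi
  have := hO.op (ord.idxOf k) hi t (by rw [hk']; exact ht) hc (by rw [hk']; exact hne)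
  exact mem_take_idxOf_lt _ _ _ this

lemma unique_on (d : PySem.Dict String (List String)) (ord : List String)
    (hO : OrdFacts d ord) (f g : String → List String)
    (hf : ∀ k, d.contains k = true → f k = stepFun d f k)
    (hg : ∀ k, d.contains k = true → g k = stepFun d g k) :
    ∀ k, d.contains k = true → f k = g k := by
  have main : ∀ n k, d.contains k = true → ord.idxOf k = n → f k = g k := by
    intro n
    induction n using Nat.strong_induction_on with
    | _ n ih =>
      intro k hk hidx
      rw [hf k hk, hg k hk]
      apply stepFun_congr
      intro t ht htc htne
      have hkord : k ∈ ord := hO.comp k ((PySem.Dict.contains_iff_mem_keys d k).mp hk)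
      have hlt : ord.idxOf t < ord.idxOf k := ord_deps_lt d ord hO k t hkord ht htc htne
      exact ih _ (hidx ▸ hlt) t htc rfl
  exact fun k hk => main (ord.idxOf k) k hk rfl

-- ===== A side =====

def AInv (d : PySem.Dict String (List String)) (tp : List String)
    (U : PySem.Dict String (List String)) : Prop :=
  tp.Nodup ∧ (∀ k, (k ∈ d.keys ∧ k ∉ tp) ↔ U.contains k = true) ∧
  (∀ x ∈ tp, x ∈ d.keys) ∧ EqnInv d U

def phi (d : PySem.Dict String (List String)) (U : PySem.Dict String (List String))
    (tp : List String) : Nat :=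
  (d.keys.filter (fun k => !(U.contains k))).length * (d.keys.length + 1) +
  (match (kahnOrder d).find? (fun k => !(U.contains k)) with
   | some u => tp.idxOf u
   | none => 0)

lemma rrScan_no (U : PySem.Dict String (List String)) (tp : List String) (key : String)
    (refs : PySem.Dict String (PySem.Set String)) :
    ∀ (l nr : List String), (∀ t ∈ l, ¬((U.get? t).isNone = true ∧ t ∈ tp)) →
    rrScan U tp key refs l nr =
      (nr ++ l.flatMap (fun t => if (U.get? t).isSome then U.getD t [] else [t]), false, tp, refs) := by
  intro l
  induction l with
  | nil => intro nr _; simp [rrScan]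
  | cons t rest ih =>
    intro nr h
    have ht := h t (by simp)
    rw [rrScan]
    by_cases hn : (U.get? t).isNone = true
    · have htp : t ∉ tp := fun hm => ht ⟨hn, hm⟩
      have htp' : ¬(tp.contains t = true) := by
        simp [htp]
      rw [if_pos hn, if_neg htp']
      rw [ih _ (fun x hx => h x (List.mem_cons_of_mem _ hx))]
      have : (U.get? t).isSome = false := by
        cases hu : U.get? t <;> simp_all
      simp [this, List.flatMap_cons]
    · have hs : (U.get? t).isSome = true := by
        cases hu : U.get? t <;> simp_all
      rw [if_neg hn]
      rw [ih _ (fun x hx => h x (List.mem_cons_of_mem _ hx))]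
      simp [hs, List.flatMap_cons]

lemma rrScan_yes (U : PySem.Dict String (List String)) (tp : List String) (key : String)
    (refs : PySem.Dict String (PySem.Set String)) :
    ∀ (l nr : List String), (∃ t ∈ l, (U.get? t).isNone = true ∧ t ∈ tp) →
    (rrScan U tp key refs l nr).2.1 = true ∧
    (rrScan U tp key refs l nr).2.2.1 = tp ++ [key] := by
  intro l
  induction l with
  | nil => intro nr h; simp at h
  | cons t rest ih =>
    intro nr h
    rw [rrScan]
    by_cases hn : (U.get? t).isNone = true
    · by_cases htp : tp.contains t = true
      · rw [if_pos hn, if_pos htp]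
        exact ⟨rfl, rfl⟩
      · have hm : t ∉ tp := by
          simp at htp; exact htp
        rw [if_pos hn, if_neg htp]
        apply ih
        rcases h with ⟨x, hx, hxn, hxm⟩
        rcases List.mem_cons.mp hx with rfl | hx'
        · exact absurd hxm hm
        · exact ⟨x, hx', hxn, hxm⟩
    · rw [if_neg hn]
      apply ih
      rcases h with ⟨x, hx, hxn, hxm⟩
      rcases List.mem_cons.mp hx with rfl | hx'
      · exact absurd hxn hn
      · exact ⟨x, hx', hxn, hxm⟩

lemma isNone_iff_contains_false (U : PySem.Dict String (List String)) (t : String) :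
    (U.get? t).isNone = true ↔ U.contains t = false := by
  rw [PySem.Dict.contains_eq_isSome_get?]
  cases U.get? t <;> simp

lemma countP_flip (l : List String) (p q : String → Bool) (key : String) (hnd : l.Nodup)
    (hk : key ∈ l) (hpk : p key = true) (hqk : q key = false)
    (hagree : ∀ x ∈ l, x ≠ key → p x = q x) :
    l.countP q + 1 = l.countP p := by
  induction l with
  | nil => simp at hk
  | cons a l ih =>
    rcases List.mem_cons.mp hk with rfl | hkl
    · have hnotin : key ∉ l := (List.nodup_cons.mp hnd).1
      have : l.countP p = l.countP q := by
        apply List.countP_congr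
        intro x hx
        rw [hagree x (List.mem_cons_of_mem _ hx) (fun e => hnotin (e ▸ hx))]
      simp only [List.countP_cons, hpk, hqk, this]
      simp
    · have hane : a ≠ key := by
        rintro rfl; exact (List.nodup_cons.mp hnd).1 hkl
      have hpa := hagree a (List.mem_cons_self) hane
      have := ih (List.nodup_cons.mp hnd).2 hkl
        (fun x hx hne => hagree x (List.mem_cons_of_mem _ hx) hne)
      simp only [List.countP_cons, ← hpa]
      omega

lemma nodup_subset_length (tp l : List String) (hnd : tp.Nodup) (hsub : ∀ x ∈ tp, x ∈ l) :
    tp.length ≤ l.length :=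
  (List.subperm_of_subset hnd hsub).length_le

lemma rrLoop_spec (d : PySem.Dict String (List String)) (hk : d.keys.Nodup)
    (hO : OrdFacts d (kahnOrder d)) :
    ∀ (fuel : Nat) (tp : List String) (U : PySem.Dict String (List String))
      (refs : PySem.Dict String (PySem.Set String)) (order : List String),
      AInv d tp U → phi d U tp < fuel →
      (∀ k, (rrLoop d fuel tp U refs order).contains k = true ↔ k ∈ d.keys) ∧
      EqnInv d (rrLoop d fuel tp U refs order) := by
  intro fuel
  induction fuel with
  | zero => intro tp U refs order _ hphi; exact absurd hphi (Nat.not_lt_zero _)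
  | succ fuel ih =>
    intro tp U refs order hInv hphi
    obtain ⟨hnd, hiff, hsub, hEq⟩ := hInv
    match tp, hnd, hiff, hsub with
    | [], hnd, hiff, hsub =>
      rw [rrLoop]
      refine ⟨fun k => ⟨fun hc => ((hiff k).mpr hc).1, fun hm => (hiff k).mp ⟨hm, by simp⟩⟩, hEq⟩
    | key :: rest, hnd, hiff, hsub =>
      rw [rrLoop]
      have hkeymem : key ∈ d.keys := hsub key (by simp)
      have hkeyrest : key ∉ rest := (List.nodup_cons.mp hnd).1
      have hkeyU : U.contains key = false := by
        cases hc : U.contains key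
        · rfl
        · exact absurd (((hiff key).mpr hc).2) (by simp)
      -- the first not-yet-defined key in Kahn order: it exists, and A defines it when popped
      have hfind : ∃ u, (kahnOrder d).find? (fun k => !(U.contains k)) = some u := by
        rw [← Option.isSome_iff_exists]
        rw [List.find?_isSome]
        exact ⟨key, hO.comp key hkeymem, by simp [hkeyU]⟩
      obtain ⟨u, hfind⟩ := hfind
      obtain ⟨hpu, pre, suf, hsplit, hpre⟩ := List.find?_eq_some_iff_append.mp hfind
      have hpredef : ∀ x ∈ pre, U.contains x = true := by
        intro x hx
        have := hpre x hx
        simpa using this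
      have huU : U.contains u = false := by simpa using hpu
      have humem : u ∈ d.keys := hO.sub u (by rw [hsplit]; simp)
      have hutp : u ∈ key :: rest := by
        by_contra hmem
        exact absurd ((hiff u).mp ⟨humem, hmem⟩) (by simp [huU])
      -- deps of u are all already defined
      have hudef : ∀ t, t ∈ d.getD u [] → d.contains t = true → t ≠ u → U.contains t = true := by
        intro t ht hc hne
        have hlen : pre.length < (kahnOrder d).length := by
          rw [hsplit]; simp
        have hgetu : (kahnOrder d)[pre.length]'hlen = u := by
          rw [List.getElem_of_eq hsplit hlen]
          rw [List.getElem_append_right (Nat.le_refl _)]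
          simp
        have := hO.op pre.length hlen t (by rw [hgetu]; exact ht) hc (by rw [hgetu]; exact hne)
        rw [hsplit, List.take_append, List.take_of_length_le (Nat.le_refl _)] at this
        simp only [Nat.sub_self, List.take_zero, List.append_nil] at this
        exact hpredef t this
      rcases hsc : rrScan U rest key refs (d.getD key []) [] with ⟨nr, sk, tp', refs'⟩
      by_cases hskip : ∃ t ∈ d.getD key [], (U.get? t).isNone = true ∧ t ∈ rest
      · -- Python postpones key; the measure's second component decreases
        obtain ⟨hs1, hs2⟩ := rrScan_yes U rest key refs (d.getD key []) [] hskip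
        rw [hsc] at hs1 hs2
        simp only at hs1 hs2
        subst hs1
        subst hs2
        simp only [if_pos rfl]
        have hune : u ≠ key := by
          intro hukey
          obtain ⟨t, ht, htn, htr⟩ := hskip
          have htmem : t ∈ d.keys := hsub t (List.mem_cons_of_mem _ htr)
          have htc : d.contains t = true := (PySem.Dict.contains_iff_mem_keys d t).mpr htmem
          have htne : t ≠ u := fun e => hkeyrest ((e.trans hukey) ▸ htr)
          have hdef := hudef t (by rw [hukey]; exact ht) htc htne
          rw [(isNone_iff_contains_false U t).mp htn] at hdef
          exact Bool.false_ne_true hdef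
        have hurest : u ∈ rest := by
          rcases List.mem_cons.mp hutp with rfl | h
          · exact absurd rfl hune
          · exact h
        apply ih (rest ++ [key]) U refs' order
        · refine ⟨?_, ?_, ?_, hEq⟩
          · rw [List.nodup_append]
            exact ⟨(List.nodup_cons.mp hnd).2, List.nodup_singleton _,
              fun a ha b hb => by rw [List.mem_singleton.mp hb]; rintro rfl; exact hkeyrest ha⟩
          · intro k
            rw [← hiff k]
            constructor
            · rintro ⟨h1, h2⟩
              refine ⟨h1, fun hm => ?_⟩
              rcases List.mem_cons.mp hm with rfl | hm'
              · exact h2 (by simp)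
              · exact h2 (List.mem_append_left _ hm')
            · rintro ⟨h1, h2⟩
              refine ⟨h1, fun hm => ?_⟩
              rcases List.mem_append.mp hm with hm' | hm'
              · exact h2 (List.mem_cons_of_mem _ hm')
              · exact h2 (by simp at hm'; simp [hm'])
          · intro x hx
            rcases List.mem_append.mp hx with h | h
            · exact hsub x (List.mem_cons_of_mem _ h)
            · exact hsub x (by simp at h; simp [h])
        · -- phi strictly decreases
          have hphi1 : phi d U (key :: rest)
              = (d.keys.filter (fun k => !(U.contains k))).length * (d.keys.length + 1)
                + (rest.idxOf u + 1) := by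
            unfold phi
            rw [hfind]
            show _ * _ + List.idxOf u (key :: rest) = _
            rw [List.idxOf_cons_ne _ (fun e => hune e.symm)]
          have hphi2 : phi d U (rest ++ [key])
              = (d.keys.filter (fun k => !(U.contains k))).length * (d.keys.length + 1)
                + rest.idxOf u := by
            unfold phi
            rw [hfind]
            show _ * _ + List.idxOf u (rest ++ [key]) = _
            rw [List.idxOf_append_of_mem hurest]
          omega
      · -- Python defines key here: its expansion enters the table
        have hforall : ∀ t ∈ d.getD key [], ¬((U.get? t).isNone = true ∧ t ∈ rest) := by
          intro t ht hcon
          exact hskip ⟨t, ht, hcon⟩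
        have hscan := rrScan_no U rest key refs (d.getD key []) [] hforall
        rw [hsc] at hscan
        simp only [Prod.mk.injEq, List.nil_append] at hscan
        obtain ⟨e1, e2, e3, e4⟩ := hscan
        subst e1; subst e2
        rw [e3, e4]
        set nrl := List.flatMap (fun t => if (U.get? t).isSome = true then U.getD t [] else [t]) (d.getD key []) with hnrl
        -- every dependency of key is already defined (else the scan would have skipped)
        have hdeps : ∀ t ∈ d.getD key [], d.contains t = true → t ≠ key → U.contains t = true := by
          intro t ht hc hne
          cases hct : U.contains t
          · exfalso
            have htk : t ∈ d.keys := (PySem.Dict.contains_iff_mem_keys d t).mp hc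
            have htin : t ∈ key :: rest := by
              by_contra hmem
              have := (hiff t).mp ⟨htk, hmem⟩
              rw [hct] at this
              exact Bool.false_ne_true this
            have htr : t ∈ rest := by
              rcases List.mem_cons.mp htin with rfl | h
              · exact absurd rfl hne
              · exact h
            exact hforall t ht ⟨(isNone_iff_contains_false U t).mpr hct, htr⟩
          · rfl
        have hval : nrl = stepFun d (fun t => (U.insert key nrl).getD t []) key := by
          rw [hnrl]
          unfold stepFun
          apply List.flatMap_congr
          intro t ht
          by_cases hdep : (d.contains t && !(t == key)) = true
          · rw [if_pos hdep]
            rw [Bool.and_eq_true, Bool.not_eq_true', beq_eq_false_iff_ne] at hdep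
            have hu := hdeps t ht hdep.1 hdep.2
            have hsome : (U.get? t).isSome = true := by
              rw [← PySem.Dict.contains_eq_isSome_get?]
              exact hu
            rw [if_pos hsome]
            dsimp only
            rw [PySem.Dict.getD_insert, if_neg hdep.2]
          · rw [if_neg hdep]
            have hsome : (U.get? t).isSome = false := by
              cases hs : (U.get? t).isSome
              · rfl
              · exfalso
                have hcontains : U.contains t = true := by
                  rw [PySem.Dict.contains_eq_isSome_get?]
                  exact hs
                have hmem := (hiff t).mpr hcontains
                have htc : d.contains t = true := (PySem.Dict.contains_iff_mem_keys d t).mpr hmem.1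
                have htnk : (t == key) = false := by
                  rw [beq_eq_false_iff_ne]
                  rintro rfl
                  exact hmem.2 (by simp)
                exact hdep (by rw [htc, htnk]; rfl)
            rw [if_neg (by rw [hsome]; exact Bool.false_ne_true)]
        have hEq' : EqnInv d (U.insert key nrl) := by
          intro k v hget
          rw [PySem.Dict.get?_insert] at hget
          by_cases hkk : k = key
          · rw [if_pos hkk] at hget
            injection hget with hv
            subst hkk
            constructor
            · intro t ht hc hne
              rw [PySem.Dict.contains_insert, Bool.or_eq_true]
              exact Or.inr (hdeps t ht hc hne)
            · rw [← hv]
              exact hval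
          · rw [if_neg hkk] at hget
            obtain ⟨hd1, hd2⟩ := hEq k v hget
            constructor
            · intro t ht hc hne
              rw [PySem.Dict.contains_insert, Bool.or_eq_true]
              exact Or.inr (hd1 t ht hc hne)
            · rw [hd2]
              apply stepFun_congr
              intro t ht hc hne
              have hut : U.contains t = true := hd1 t ht hc hne
              have htnkey : t ≠ key := by
                rintro rfl
                rw [hkeyU] at hut
                exact Bool.false_ne_true hut
              rw [PySem.Dict.getD_insert, if_neg htnkey]
        show (∀ k, (rrLoop d fuel rest (U.insert key nrl) refs (order ++ [key])).contains k = true ↔ k ∈ d.keys) ∧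
          EqnInv d (rrLoop d fuel rest (U.insert key nrl) refs (order ++ [key]))
        apply ih rest (U.insert key nrl) refs (order ++ [key])
        · refine ⟨(List.nodup_cons.mp hnd).2, ?_,
            fun x hx => hsub x (List.mem_cons_of_mem _ hx), hEq'⟩
          intro k
          rw [PySem.Dict.contains_insert, Bool.or_eq_true, beq_iff_eq]
          constructor
          · rintro ⟨h1, h2⟩
            by_cases hkk : k = key
            · exact Or.inl hkk
            · refine Or.inr ((hiff k).mp ⟨h1, fun hm => ?_⟩)
              rcases List.mem_cons.mp hm with rfl | hm'
              · exact hkk rfl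
              · exact h2 hm'
          · rintro (rfl | hc)
            · exact ⟨hkeymem, hkeyrest⟩
            · obtain ⟨h1, h2⟩ := (hiff k).mpr hc
              exact ⟨h1, fun hm => h2 (List.mem_cons_of_mem _ hm)⟩
        · -- phi decreases: one more key is defined
          have hcount : (d.keys.filter (fun k => !((U.insert key nrl).contains k))).length + 1
              = (d.keys.filter (fun k => !(U.contains k))).length := by
            rw [← List.countP_eq_length_filter, ← List.countP_eq_length_filter]
            apply countP_flip d.keys _ _ key hk hkeymem
            · rw [hkeyU]; rfl
            · rw [PySem.Dict.contains_insert]; simp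
            · intro x hx hne
              rw [PySem.Dict.contains_insert]
              have : (x == key) = false := by rw [beq_eq_false_iff_ne]; exact hne
              rw [this, Bool.false_or]
          have hidx1 : (match (kahnOrder d).find? (fun k => !((U.insert key nrl).contains k)) with
              | some w => rest.idxOf w | none => 0) ≤ rest.length := by
            cases (kahnOrder d).find? (fun k => !((U.insert key nrl).contains k)) with
            | none => exact Nat.zero_le _
            | some w => exact List.idxOf_le_length
          have hrest_tmp : rest.length ≤ d.keys.length :=
            nodup_subset_length rest d.keys (List.nodup_cons.mp hnd).2
              (fun x hx => hsub x (List.mem_cons_of_mem _ hx))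
          have hA : phi d (U.insert key nrl) rest
              ≤ (d.keys.filter (fun k => !((U.insert key nrl).contains k))).length
                * (d.keys.length + 1) + d.keys.length := by
            unfold phi
            exact Nat.add_le_add_left (le_trans hidx1 hrest_tmp) _
          have hB : (d.keys.filter (fun k => !(U.contains k))).length * (d.keys.length + 1)
              ≤ phi d U (key :: rest) := by
            unfold phi
            exact Nat.le_add_right _ _
          have he : (d.keys.filter (fun k => !(U.contains k))).length * (d.keys.length + 1)
              = (d.keys.filter (fun k => !((U.insert key nrl).contains k))).length
                * (d.keys.length + 1) + (d.keys.length + 1) := by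
            rw [← hcount]
            ring
          omega

-- ===== B side =====

def KeysInv (d M : PySem.Dict String (List String)) : Prop :=
  ∀ k, M.contains k = true → k ∈ d.keys

lemma expandListB_spec (d : PySem.Dict String (List String)) (_hO : OrdFacts d (kahnOrder d))
    (fuel : Nat)
    (hP : ∀ (key : String) (M : PySem.Dict String (List String)),
      EqnInv d M → KeysInv d M → key ∈ d.keys → (kahnOrder d).idxOf key < fuel →
      EqnInv d (expandB d fuel key M).2 ∧ KeysInv d (expandB d fuel key M).2 ∧
      (∀ j w, M.get? j = some w → (expandB d fuel key M).2.get? j = some w) ∧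
      (∀ j, (expandB d fuel key M).2.contains j = true →
        M.contains j = true ∨ (kahnOrder d).idxOf j ≤ (kahnOrder d).idxOf key) ∧
      (expandB d fuel key M).2.get? key = some (expandB d fuel key M).1) :
    ∀ (ts : List String) (key : String) (M : PySem.Dict String (List String)),
      EqnInv d M → KeysInv d M → key ∈ d.keys →
      (∀ t ∈ ts, d.contains t = true → t ≠ key → (kahnOrder d).idxOf t < fuel) →
      EqnInv d (expandListB d fuel key ts M).2 ∧ KeysInv d (expandListB d fuel key ts M).2 ∧
      (∀ j w, M.get? j = some w → (expandListB d fuel key ts M).2.get? j = some w) ∧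
      (∀ j, (expandListB d fuel key ts M).2.contains j = true →
        M.contains j = true ∨ ∃ t ∈ ts, d.contains t = true ∧ t ≠ key ∧
          (kahnOrder d).idxOf j ≤ (kahnOrder d).idxOf t) ∧
      (expandListB d fuel key ts M).1
        = ts.flatMap (fun t => if d.contains t && !(t == key)
            then (expandListB d fuel key ts M).2.getD t [] else [t]) ∧
      (∀ t ∈ ts, d.contains t = true → t ≠ key →
        (expandListB d fuel key ts M).2.contains t = true) := by
  intro ts
  induction ts with
  | nil =>
    intro key M hE hK hkm hts
    rw [expandListB]
    exact ⟨hE, hK, fun j w h => h, fun j h => Or.inl h, rfl, fun t ht => absurd ht (by simp)⟩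
  | cons t ts ih =>
    intro key M hE hK hkm hts
    rw [expandListB]
    by_cases hdep : (!(t == key) && d.contains t) = true
    · rw [if_pos hdep]
      rw [Bool.and_eq_true, Bool.not_eq_true', beq_eq_false_iff_ne] at hdep
      obtain ⟨htne, htc⟩ := hdep
      have htidx : (kahnOrder d).idxOf t < fuel := hts t (by simp) htc htne
      have htkm : t ∈ d.keys := (PySem.Dict.contains_iff_mem_keys d t).mp htc
      rcases hB : expandB d fuel t M with ⟨v, M1⟩
      obtain ⟨hE1, hK1, hmono1, hnew1, hget1⟩ := hB ▸ hP t M hE hK htkm htidx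
      dsimp only
      rcases hL : expandListB d fuel key ts M1 with ⟨out, M2⟩
      obtain ⟨hE2, hK2, hmono2, hnew2, hout2, hdeps2⟩ :=
        hL ▸ ih key M1 hE1 hK1 hkm (fun x hx => hts x (List.mem_cons_of_mem _ hx))
      have hgt : M2.get? t = some v := hmono2 t v hget1
      refine ⟨hE2, hK2, ?_, ?_, ?_, ?_⟩
      · exact fun j w h => hmono2 j w (hmono1 j w h)
      · intro j hj
        rcases hnew2 j hj with hj1 | ⟨x, hx, hxc, hxne, hxle⟩
        · rcases hnew1 j hj1 with hj2 | hle
          · exact Or.inl hj2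
          · exact Or.inr ⟨t, by simp, htc, htne, hle⟩
        · exact Or.inr ⟨x, List.mem_cons_of_mem _ hx, hxc, hxne, hxle⟩
      · rw [List.flatMap_cons]
        have hcond : (d.contains t && !(t == key)) = true := by
          rw [Bool.and_eq_true, Bool.not_eq_true', beq_eq_false_iff_ne]
          exact ⟨htc, htne⟩
        rw [if_pos hcond]
        rw [PySem.Dict.getD_eq_get?_getD, hgt, Option.getD_some]
        exact congrArg _ hout2
      · intro x hx hxc hxne
        rcases List.mem_cons.mp hx with rfl | hx'
        · rw [PySem.Dict.contains_eq_isSome_get?, hgt]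
          rfl
        · exact hdeps2 x hx' hxc hxne
    · rw [if_neg hdep]
      dsimp only
      rcases hL : expandListB d fuel key ts M with ⟨out, M1⟩
      obtain ⟨hE1, hK1, hmono1, hnew1, hout1, hdeps1⟩ :=
        hL ▸ ih key M hE hK hkm (fun x hx => hts x (List.mem_cons_of_mem _ hx))
      have hcond : (d.contains t && !(t == key)) = false := by
        cases hc : (d.contains t && !(t == key))
        · rfl
        · exfalso
          apply hdep
          rw [Bool.and_eq_true] at hc
          rw [Bool.and_eq_true]
          exact ⟨hc.2, hc.1⟩
      refine ⟨hE1, hK1, hmono1, ?_, ?_, ?_⟩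
      · intro j hj
        rcases hnew1 j hj with hj1 | ⟨x, hx, hxc, hxne, hxle⟩
        · exact Or.inl hj1
        · exact Or.inr ⟨x, List.mem_cons_of_mem _ hx, hxc, hxne, hxle⟩
      · rw [List.flatMap_cons]
        rw [if_neg (by rw [hcond]; exact Bool.false_ne_true)]
        rw [List.singleton_append]
        exact congrArg _ hout1
      · intro x hx hxc hxne
        rcases List.mem_cons.mp hx with rfl | hx'
        · exfalso
          have : (d.contains x && !(x == key)) = true := by
            rw [Bool.and_eq_true, Bool.not_eq_true', beq_eq_false_iff_ne]
            exact ⟨hxc, hxne⟩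
          rw [this] at hcond
          exact (Bool.false_ne_true hcond.symm)
        · exact hdeps1 x hx' hxc hxne

lemma expandB_spec (d : PySem.Dict String (List String)) (hO : OrdFacts d (kahnOrder d)) :
    ∀ (fuel : Nat) (key : String) (M : PySem.Dict String (List String)),
      EqnInv d M → KeysInv d M → key ∈ d.keys → (kahnOrder d).idxOf key < fuel →
      EqnInv d (expandB d fuel key M).2 ∧ KeysInv d (expandB d fuel key M).2 ∧
      (∀ j w, M.get? j = some w → (expandB d fuel key M).2.get? j = some w) ∧
      (∀ j, (expandB d fuel key M).2.contains j = true →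
        M.contains j = true ∨ (kahnOrder d).idxOf j ≤ (kahnOrder d).idxOf key) ∧
      (expandB d fuel key M).2.get? key = some (expandB d fuel key M).1 := by
  intro fuel
  induction fuel with
  | zero => intro key M _ _ _ h; exact absurd h (Nat.not_lt_zero _)
  | succ fuel ih =>
    intro key M hE hK hkm hidx
    rw [expandB]
    cases hg : M.get? key with
    | some v =>
      exact ⟨hE, hK, fun j w h => h, fun j h => Or.inl h, hg⟩
    | none =>
      have hkc : d.contains key = true := (PySem.Dict.contains_iff_mem_keys d key).mpr hkm
      have hts : ∀ t ∈ d.getD key [], d.contains t = true → t ≠ key →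
          (kahnOrder d).idxOf t < fuel := by
        intro t ht htc htne
        have := ord_deps_lt d (kahnOrder d) hO key t (hO.comp key hkm) ht htc htne
        omega
      dsimp only
      rcases hL : expandListB d fuel key (d.getD key []) M with ⟨out, M1⟩
      obtain ⟨hE1, hK1, hmono1, hnew1, hout1, hdeps1⟩ :=
        hL ▸ expandListB_spec d hO fuel ih (d.getD key []) key M hE hK hkm hts
      have hMkey : M.contains key = false := by
        rw [PySem.Dict.contains_eq_isSome_get?, hg]
        rfl
      have hM1key : M1.contains key = false := by
        cases hc : M1.contains key
        · rfl
        · exfalso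
          rcases hnew1 key hc with h | ⟨x, hx, hxc, hxne, hxle⟩
          · rw [hMkey] at h; exact Bool.false_ne_true h
          · have := ord_deps_lt d (kahnOrder d) hO key x (hO.comp key hkm) hx hxc hxne
            omega
      have hout1' : out = List.flatMap (fun t => if (d.contains t && !(t == key)) = true
          then M1.getD t [] else [t]) (d.getD key []) := hout1
      have hval : out = stepFun d (fun t => (M1.insert key out).getD t []) key := by
        rw [hout1']
        unfold stepFun
        apply List.flatMap_congr
        intro t ht
        by_cases hdep : (d.contains t && !(t == key)) = true
        · rw [if_pos hdep, if_pos hdep]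
          rw [Bool.and_eq_true, Bool.not_eq_true', beq_eq_false_iff_ne] at hdep
          dsimp only
          rw [PySem.Dict.getD_insert, if_neg hdep.2]
        · rw [if_neg hdep, if_neg hdep]
      refine ⟨?_, ?_, ?_, ?_, ?_⟩
      · intro k v hget
        rw [PySem.Dict.get?_insert] at hget
        by_cases hkk : k = key
        · rw [if_pos hkk] at hget
          injection hget with hv
          subst hkk
          constructor
          · intro t ht hc hne
            rw [PySem.Dict.contains_insert, Bool.or_eq_true]
            exact Or.inr (hdeps1 t ht hc hne)
          · rw [← hv]
            exact hval
        · rw [if_neg hkk] at hget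
          obtain ⟨hd1, hd2⟩ := hE1 k v hget
          constructor
          · intro t ht hc hne
            rw [PySem.Dict.contains_insert, Bool.or_eq_true]
            exact Or.inr (hd1 t ht hc hne)
          · rw [hd2]
            apply stepFun_congr
            intro t ht hc hne
            have hM1t : M1.contains t = true := hd1 t ht hc hne
            have htnkey : t ≠ key := by
              rintro rfl
              rw [hM1key] at hM1t
              exact Bool.false_ne_true hM1t
            rw [PySem.Dict.getD_insert, if_neg htnkey]
      · intro k hck
        rw [PySem.Dict.contains_insert, Bool.or_eq_true, beq_iff_eq] at hck
        rcases hck with rfl | hck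
        · exact hkm
        · exact hK1 k hck
      · intro j w hjw
        have hjne : j ≠ key := by
          rintro rfl
          rw [hg] at hjw
          simp at hjw
        rw [PySem.Dict.get?_insert, if_neg hjne]
        exact hmono1 j w hjw
      · intro j hj
        rw [PySem.Dict.contains_insert, Bool.or_eq_true, beq_iff_eq] at hj
        rcases hj with rfl | hj
        · exact Or.inr (Nat.le_refl _)
        · rcases hnew1 j hj with h | ⟨x, hx, hxc, hxne, hxle⟩
          · exact Or.inl h
          · have := ord_deps_lt d (kahnOrder d) hO key x (hO.comp key hkm) hx hxc hxne
            exact Or.inr (by omega)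
      · rw [PySem.Dict.get?_insert_self]

lemma expandFold_spec (d : PySem.Dict String (List String)) (hO : OrdFacts d (kahnOrder d))
    (hlen : (kahnOrder d).length = d.keys.length) :
    ∀ (l : List String) (M : PySem.Dict String (List String)),
      (∀ x ∈ l, x ∈ d.keys) → EqnInv d M → KeysInv d M →
      EqnInv d (l.foldl (fun m k => (expandB d d.keys.length k m).2) M) ∧
      KeysInv d (l.foldl (fun m k => (expandB d d.keys.length k m).2) M) ∧
      (∀ j w, M.get? j = some w →
        (l.foldl (fun m k => (expandB d d.keys.length k m).2) M).get? j = some w) ∧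
      (∀ x ∈ l, (l.foldl (fun m k => (expandB d d.keys.length k m).2) M).contains x = true) := by
  intro l
  induction l with
  | nil =>
    intro M hsub hE hK
    exact ⟨hE, hK, fun j w h => h, fun x hx => absurd hx (by simp)⟩
  | cons k l ih =>
    intro M hsub hE hK
    have hkm : k ∈ d.keys := hsub k (by simp)
    have hidx : (kahnOrder d).idxOf k < d.keys.length := by
      rw [← hlen]
      exact List.idxOf_lt_length_of_mem (hO.comp k hkm)
    obtain ⟨hE1, hK1, hmono1, _, hget1⟩ := expandB_spec d hO d.keys.length k M hE hK hkm hidx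
    rw [List.foldl_cons]
    obtain ⟨hE2, hK2, hmono2, hall2⟩ :=
      ih (expandB d d.keys.length k M).2 (fun x hx => hsub x (List.mem_cons_of_mem _ hx)) hE1 hK1
    refine ⟨hE2, hK2, fun j w h => hmono2 j w (hmono1 j w h), ?_⟩
    intro x hx
    rcases List.mem_cons.mp hx with rfl | hx'
    · rw [PySem.Dict.contains_eq_isSome_get?, hmono2 x _ hget1]
      rfl
    · exact hall2 x hx'

lemma expandTop_spec (d : PySem.Dict String (List String)) (_hk : d.keys.Nodup)
    (hlen : (kahnOrder d).length = d.keys.length) (hO : OrdFacts d (kahnOrder d)) :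
    EqnInv d (d.keys.foldl (fun m k => (expandB d d.keys.length k m).2) PySem.Dict.empty) ∧
    (∀ k, (d.keys.foldl (fun m k => (expandB d d.keys.length k m).2) PySem.Dict.empty).contains k = true
      ↔ k ∈ d.keys) := by
  have hEe : EqnInv d (PySem.Dict.empty : PySem.Dict String (List String)) := by
    intro k v h
    rw [PySem.Dict.get?_empty] at h
    simp at h
  have hKe : KeysInv d (PySem.Dict.empty : PySem.Dict String (List String)) := by
    intro k h
    rw [PySem.Dict.contains_empty] at h
    exact absurd h (by simp)
  obtain ⟨hE, hK, _, hall⟩ := expandFold_spec d hO hlen d.keys PySem.Dict.empty (fun x hx => hx) hEe hKe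
  exact ⟨hE, fun k => ⟨fun h => hK k h, fun h => hall k h⟩⟩

-- ===== assembly =====

lemma foldl_skip_insert (l : List (String × List (List String)))
    (p : String × List (List String) → Bool) (val : String × List (List String) → List (List String))
    (hnd : (l.map (fun kv => kv.1)).Nodup) :
    (l.foldl (fun ng kv => if p kv = true then ng else ng.insert kv.1 (val kv))
      (PySem.Dict.empty : PySem.Dict String (List (List String)))).items
    = (l.filter (fun kv => !(p kv))).map (fun kv => (kv.1, val kv)) := by
  have h1 : (fun (ng : PySem.Dict String (List (List String))) kv =>
        if p kv = true then ng else ng.insert kv.1 (val kv))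
      = (fun ng kv => if (!(p kv)) = true then ng.insert kv.1 (val kv) else ng) := by
    funext ng kv
    by_cases h : p kv = true <;> simp [h]
  rw [h1, ← List.foldl_filter]
  rw [PySem.Dict.items_foldl_insert_fresh _ _ _ _
    (fun a _ => PySem.Dict.contains_empty _)
    ((List.filter_sublist.map _).nodup hnd)]
  rfl

lemma inner_rule_flatMap (UA : PySem.Dict String (List String)) (rule : List String) :
    rule.foldl (fun nr token => if (UA.get? token).isSome = true
      then nr ++ UA.getD token [] else nr ++ [token]) []
    = rule.flatMap (fun t => if (UA.get? t).isSome = true then UA.getD t [] else [t]) := by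
  have h1 : (fun (nr : List String) token => if (UA.get? token).isSome = true
        then nr ++ UA.getD token [] else nr ++ [token])
      = (fun nr token => nr ++ (if (UA.get? token).isSome = true then UA.getD token [] else [token])) := by
    funext nr token
    by_cases h : (UA.get? token).isSome = true <;> simp [h]
  rw [h1, PySem.List.foldl_append_eq_flatMap]
  simp


-- ===== VERDICT (by name: the statement is the Claim_ definition above) =====
theorem replace_keys_by_rule_spec : Claim_equal_replace_keys_by_rule := by
  intro grammar ktr hdom hpre
  unfold Spec_replace_keys_by_rule
  unfold Pre_replace_keys_by_rule at hpre
  set d := PySem.Dict.ofList ktr with hd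
  have hk : d.keys.Nodup := PySem.Dict.nodup_keys_ofList ktr
  have hO := ordFacts_of_pre d hk hpre
  -- A's phase 1
  have hEe : EqnInv d (PySem.Dict.empty : PySem.Dict String (List String)) := by
    intro k v h
    rw [PySem.Dict.get?_empty] at h
    simp at h
  have hInv0 : AInv d d.keys PySem.Dict.empty := by
    refine ⟨hk, ?_, fun x hx => hx, hEe⟩
    intro k
    constructor
    · rintro ⟨h1, h2⟩
      exact absurd h1 h2
    · intro h
      rw [PySem.Dict.contains_empty] at h
      simp at h
  have hfuelA : phi d PySem.Dict.empty d.keys < (d.keys.length + 1) * (d.keys.length + 1) := by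
    unfold phi
    have h1 : d.keys.filter (fun k => !((PySem.Dict.empty : PySem.Dict String (List String)).contains k)) = d.keys := by
      apply List.filter_eq_self.mpr
      intro x _
      rw [PySem.Dict.contains_empty]
      rfl
    rw [h1]
    have h2 : (match (kahnOrder d).find? (fun k => !((PySem.Dict.empty : PySem.Dict String (List String)).contains k)) with
        | some u => d.keys.idxOf u | none => 0) ≤ d.keys.length := by
      cases (kahnOrder d).find? (fun k => !((PySem.Dict.empty : PySem.Dict String (List String)).contains k)) with
      | none => exact Nat.zero_le _
      | some w => exact List.idxOf_le_length
    have h3 : (d.keys.length + 1) * (d.keys.length + 1)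
        = d.keys.length * (d.keys.length + 1) + (d.keys.length + 1) := by ring
    omega
  obtain ⟨hAc, hAe⟩ := rrLoop_spec d hk hO ((d.keys.length + 1) * (d.keys.length + 1))
    d.keys PySem.Dict.empty PySem.Dict.empty [] hInv0 hfuelA
  have hUA : remove_references ktr
      = rrLoop d ((d.keys.length + 1) * (d.keys.length + 1)) d.keys PySem.Dict.empty PySem.Dict.empty [] := rfl
  set UA := remove_references ktr with hUAdef
  rw [← hUA] at hAc hAe
  -- B's phase 1
  obtain ⟨hBe, hBc⟩ := expandTop_spec d hk hpre hO
  set MB := d.keys.foldl (fun m k => (expandB d d.keys.length k m).2) PySem.Dict.empty with hMB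
  -- the two expansion tables agree
  have hFa : ∀ k, d.contains k = true → (fun t => UA.getD t []) k = stepFun d (fun t => UA.getD t []) k := by
    intro k hc
    have hck : UA.contains k = true := (hAc k).mpr ((PySem.Dict.contains_iff_mem_keys d k).mp hc)
    rw [PySem.Dict.contains_eq_isSome_get?] at hck
    cases hv : UA.get? k with
    | none => rw [hv] at hck; simp at hck
    | some v =>
      have := (hAe k v hv).2
      show UA.getD k [] = _
      rw [PySem.Dict.getD_eq_get?_getD, hv, Option.getD_some, this]
  have hFb : ∀ k, d.contains k = true → (fun t => MB.getD t []) k = stepFun d (fun t => MB.getD t []) k := by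
    intro k hc
    have hck : MB.contains k = true := (hBc k).mpr ((PySem.Dict.contains_iff_mem_keys d k).mp hc)
    rw [PySem.Dict.contains_eq_isSome_get?] at hck
    cases hv : MB.get? k with
    | none => rw [hv] at hck; simp at hck
    | some v =>
      have := (hBe k v hv).2
      show MB.getD k [] = _
      rw [PySem.Dict.getD_eq_get?_getD, hv, Option.getD_some, this]
  have hagree := unique_on d (kahnOrder d) hO _ _ hFa hFb
  -- the per-token substitution functions agree
  have htok : ∀ t, (if (UA.get? t).isSome = true then UA.getD t [] else [t])
      = (match MB.get? t with | some v => v | none => [t]) := by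
    intro t
    by_cases hmem : t ∈ d.keys
    · have hca : UA.contains t = true := (hAc t).mpr hmem
      have hcb : MB.contains t = true := (hBc t).mpr hmem
      have hsa : (UA.get? t).isSome = true := by
        rw [← PySem.Dict.contains_eq_isSome_get?]; exact hca
      rw [if_pos hsa]
      rw [PySem.Dict.contains_eq_isSome_get?] at hcb
      cases hv : MB.get? t with
      | none => rw [hv] at hcb; simp at hcb
      | some v =>
        have h1 : MB.getD t [] = v := by
          rw [PySem.Dict.getD_eq_get?_getD, hv, Option.getD_some]
        have h2 : UA.getD t [] = MB.getD t []
          := hagree t ((PySem.Dict.contains_iff_mem_keys d t).mpr hmem)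
        rw [h2, h1]
    · have hca : UA.contains t = false := by
        cases hc : UA.contains t
        · rfl
        · exact absurd ((hAc t).mp hc) hmem
      have hcb : MB.contains t = false := by
        cases hc : MB.contains t
        · rfl
        · exact absurd ((hBc t).mp hc) hmem
      rw [PySem.Dict.contains_eq_isSome_get?] at hca hcb
      rw [if_neg (by rw [hca]; exact Bool.false_ne_true)]
      cases hv : MB.get? t with
      | none => rfl
      | some v => rw [hv] at hcb; simp at hcb
  -- phase 2: fold-with-skip over the grammar dict = filter-and-map
  show replace_keys_by_rule grammar ktr = replace_keys_by_rule_alt grammar ktr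
  unfold replace_keys_by_rule replace_keys_by_rule_alt
  dsimp only
  rw [← hUAdef, ← hd, ← hMB]
  rw [foldl_skip_insert _ _ _ (PySem.Dict.nodup_keys_ofList grammar)]
  have hfilter : ((PySem.Dict.ofList grammar).items.filter (fun kv => !((UA.get? kv.1).isSome)))
      = ((PySem.Dict.ofList grammar).items.filter (fun kv => !(d.contains kv.1))) := by
    apply List.filter_congr
    intro kv _
    have : (UA.get? kv.1).isSome = d.contains kv.1 := by
      rw [← PySem.Dict.contains_eq_isSome_get?]
      cases hc : d.contains kv.1 with
      | true =>
        exact (hAc kv.1).mpr ((PySem.Dict.contains_iff_mem_keys d kv.1).mp hc)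
      | false =>
        cases hc2 : UA.contains kv.1 with
        | false => rfl
        | true =>
          have := (hAc kv.1).mp hc2
          rw [(PySem.Dict.contains_iff_mem_keys d kv.1).mpr this] at hc
          exact hc
    rw [this]
  rw [hfilter]
  apply List.map_congr_left
  intro kv _
  refine congrArg (fun z => (kv.1, z)) ?_
  rw [PySem.List.foldl_append_singleton_eq_map, List.nil_append]
  apply List.map_congr_left
  intro rule _
  rw [inner_rule_flatMap]
  apply List.flatMap_congr
  intro t _
  exact htok t
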